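-- pv_equiv track=rewrite | github.com/EHwooKim/Algorithms | Test/2020_socar/socar03.py | MBN
-- ===== SOURCE A (Python) =====
-- def MBN(arr, tmp, length):
--   numbers = '0123456789'
--
--   if len(tmp) == length:
--     arr.append(tmp)
--     return arr
--
--   for n in numbers:
--     if len(tmp) == 0 or (len(tmp) and tmp[-1] < n):
--       arr = MBN(arr, tmp + n, length)
--
--   return arr
-- ===== SOURCE B (Python) =====
-- def MBN(arr, tmp, length):
--     need = length - len(tmp)
--     if need < 0:
--         return arr
--     suffixes = ['']
--     for _ in range(need):
--         if not suffixes: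
--             break
--         suffixes = [s + d for s in suffixes
--                     for d in '0123456789'
--                     if (tmp + s)[-1:] < d]
--     arr.extend(tmp + s for s in suffixes)
--     return arr
-- ===== Notes on version B (the rewrite author's own statement) =====
-- stated objective: idiomatic
-- what changed: Replaces A's recursive digit-by-digit DFS with an iterative breadth-wise build: one comprehension pass per remaining position extends every suffix by each still-larger digit, then the results are appended to arr in one extend.
import Mathlib
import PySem

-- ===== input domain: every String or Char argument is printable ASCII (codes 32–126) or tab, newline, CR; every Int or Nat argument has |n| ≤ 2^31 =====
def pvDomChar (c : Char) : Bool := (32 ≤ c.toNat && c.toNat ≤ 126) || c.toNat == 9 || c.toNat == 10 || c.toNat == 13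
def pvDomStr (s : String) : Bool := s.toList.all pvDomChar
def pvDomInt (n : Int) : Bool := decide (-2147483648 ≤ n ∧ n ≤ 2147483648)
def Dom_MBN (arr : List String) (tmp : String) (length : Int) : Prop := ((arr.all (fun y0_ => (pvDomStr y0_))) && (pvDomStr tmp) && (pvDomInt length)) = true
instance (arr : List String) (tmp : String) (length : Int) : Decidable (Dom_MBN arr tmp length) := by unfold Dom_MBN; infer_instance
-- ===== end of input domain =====

-- B replaces A's recursive DFS by an iterative layer-by-layer product/filter build of the
-- suffixes (objective: simpler/idiomatic, same output order).  Both A and B mutate `arr` in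
-- place in Python (append/extend of the same elements); the equivalence proved here is about
-- the returned value.

-- ===== PORT A =====
-- '0123456789'
def pvDigits : List Char := ['0','1','2','3','4','5','6','7','8','9']

-- A's guard 'len(tmp) == 0 or (len(tmp) and tmp[-1] < n)'; tmp[-1] only evaluated when tmp ≠ [].
def pvCondA (t : List Char) (n : Char) : Bool :=
  t.length == 0 || (decide (0 < t.length) && decide (PySem.List.pyGetD t (-1) ' ' < n))

-- A's recursion; each recursive call appends a digit strictly greater than the last character,
-- so the real recursion depth from any start is at most 11: fuel 11 is a pure totality guard,
-- never exhausted (pvGoA_eq_res below proves this via the measure (pvPool t).length < fuel).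
def pvGoA (fuel : Nat) (arr : List String) (t : List Char) (length : Int) : List String :=
  match fuel with
  | 0 => arr
  | f+1 =>
    if (t.length : Int) = length then arr ++ [String.ofList t]
    else pvDigits.foldl (fun acc n => if pvCondA t n then pvGoA f acc (t ++ [n]) length else acc) arr

def MBN (arr : List String) (tmp : String) (length : Int) : List String :=
  pvGoA 11 arr tmp.toList length

-- ===== PORT B =====
-- Source B's comparison '(tmp + s)[-1:] < d': the one-character slice is the empty string (which is
-- < any one-character string d) iff the list is empty, else it compares the last character to d.
def pvLastLt (l : List Char) (d : Char) : Bool :=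
  match l.getLast? with
  | none => true
  | some x => decide (x < d)

-- one pass of Source B's comprehension: [s + d for s in suffixes for d in '0123456789' if (tmp+s)[-1:] < d]
def pvStep (t : List Char) (ss : List (List Char)) : List (List Char) :=
  ss.flatMap (fun s => (pvDigits.filter (fun d => pvLastLt (t ++ s) d)).map (fun d => s ++ [d]))

-- Source B's loop 'for _ in range(need): if not suffixes: break; suffixes = …',
-- as a recursion on the remaining iteration count that stops at the break
def pvIterB (m : Nat) (t : List Char) (ss : List (List Char)) : List (List Char) :=
  match m with
  | 0 => ss
  | m+1 => if ss = [] then ss else pvIterB m t (pvStep t ss)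

def MBN_alt (arr : List String) (tmp : String) (length : Int) : List String :=
  let t := tmp.toList
  let need := length - (t.length : Int)
  if need < 0 then arr
  else
    let suffixes := pvIterB need.toNat t [[]]
    arr ++ suffixes.map (fun s => String.ofList (t ++ s))

-- ===== PRECONDITION & SPEC =====
def Spec_MBN (arr : List String) (tmp : String) (length : Int) (out : List String) : Prop := out = MBN_alt arr tmp length
instance (arr : List String) (tmp : String) (length : Int) (out : List String) : Decidable (Spec_MBN arr tmp length out) := by unfold Spec_MBN; infer_instance

-- ===== CLAIM (what is proved, stated in full; the proofs are below) =====
def Claim_equal_MBN : Prop := ∀ (arr : List String) (tmp : String) (length : Int), Dom_MBN arr tmp length → Spec_MBN arr tmp length (MBN arr tmp length)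

-- ===== LEMMAS AND PROOFS =====

-- the digits still available after prefix t
def pvPool (t : List Char) : List Char := pvDigits.filter (pvLastLt t)

-- canonical first-digit-first enumeration of the strictly increasing k-letter words over l
def pvC : Nat → List Char → List (List Char)
  | 0, _ => [[]]
  | k+1, l => l.flatMap (fun n => (pvC k (l.filter (fun d => decide (n < d)))).map (fun s => n :: s))

lemma mem_pvC {k : Nat} {l : List Char} {s : List Char} (hs : s ∈ pvC k l) : ∀ x ∈ s, x ∈ l := by
  induction k generalizing l s with
  | zero => simp [pvC] at hs; simp [hs]
  | succ k ih =>
    simp only [pvC, List.mem_flatMap, List.mem_map] at hs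
    obtain ⟨n, hn, s', hs', rfl⟩ := hs
    intro x hx
    rcases List.mem_cons.1 hx with rfl | hx
    · exact hn
    · exact List.mem_of_mem_filter (ih hs' x hx)

lemma pvCondA_eq (t : List Char) (n : Char) : pvCondA t n = pvLastLt t n := by
  cases t with
  | nil => simp [pvCondA, pvLastLt]
  | cons a t' =>
    have h : a :: t' ≠ [] := by simp
    simp only [pvCondA, pvLastLt, PySem.List.pyGetD_neg_one (a :: t') ' ' h,
      List.getLast?_eq_some_getLast h]
    simp

lemma pvLastLt_trans {t : List Char} {x d : Char} (hx : pvLastLt t x = true) (hxd : x < d) :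
    pvLastLt t d = true := by
  cases hgl : t.getLast? with
  | none => simp [pvLastLt, hgl]
  | some y =>
    simp only [pvLastLt, hgl] at hx ⊢
    exact decide_eq_true (lt_trans (of_decide_eq_true hx) hxd)

lemma length_filter_le_of_imp {l : List Char} {p q : Char → Bool}
    (h : ∀ a, p a = true → q a = true) : (l.filter p).length ≤ (l.filter q).length := by
  induction l with
  | nil => simp
  | cons a l' ih =>
    by_cases hp : p a = true
    · simp [hp, h a hp]; omega
    · by_cases hq : q a = true <;> simp [hp, hq] <;> omega

lemma length_filter_lt_of_witness {l : List Char} {p q : Char → Bool}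
    (h : ∀ a, p a = true → q a = true) {x : Char} (hx : x ∈ l)
    (hpx : p x = false) (hqx : q x = true) : (l.filter p).length < (l.filter q).length := by
  induction l with
  | nil => simp at hx
  | cons a l' ih =>
    rcases List.mem_cons.1 hx with rfl | hx'
    · simp only [List.filter_cons, hpx, hqx]
      simp
      exact length_filter_le_of_imp h
    · by_cases hp : p a = true
      · simp [hp, h a hp]
        exact ih hx'
      · by_cases hq : q a = true
        · simp [hp, hq]
          exact Nat.le_of_lt (ih hx')
        · simp [hp, hq]
          exact ih hx'

lemma pvPool_concat (t : List Char) (n : Char) :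
    pvPool (t ++ [n]) = pvDigits.filter (fun d => decide (n < d)) := by
  unfold pvPool
  apply List.filter_congr
  intro d _
  simp [pvLastLt]

lemma pvPool_concat_lt (t : List Char) (n : Char) (hn : pvLastLt t n = true) (hnd : n ∈ pvDigits) :
    (pvPool (t ++ [n])).length < (pvPool t).length := by
  rw [pvPool_concat]
  exact length_filter_lt_of_witness
    (fun a ha => pvLastLt_trans hn (of_decide_eq_true ha)) hnd (by simp) hn

lemma pvPool_filter (t : List Char) (n : Char) (hn : pvLastLt t n = true) :
    (pvPool t).filter (fun d => decide (n < d)) = pvDigits.filter (fun d => decide (n < d)) := by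
  unfold pvPool
  rw [List.filter_filter]
  apply List.filter_congr
  intro d _
  by_cases hd : n < d
  · simp [hd, pvLastLt_trans hn hd]
  · simp [hd]

lemma pvLastLt_cons (n a : Char) (s : List Char) :
    pvLastLt (n :: a :: s) = pvLastLt (a :: s) := by
  funext d; simp [pvLastLt, List.getLast?_cons_cons]

-- the filter identity behind extending a word on the right
lemma filter_cnd_cons (l : List Char) (n : Char) (s : List Char)
    (hmono : ∀ x ∈ s, n < x) :
    l.filter (pvLastLt (n :: s)) = (l.filter (fun d => decide (n < d))).filter (pvLastLt s) := by
  cases s with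
  | nil =>
    rw [List.filter_filter]
    apply List.filter_congr
    intro d _
    simp [pvLastLt]
  | cons a s' =>
    rw [pvLastLt_cons, List.filter_filter]
    apply List.filter_congr
    intro d _
    cases hgl : (a :: s').getLast? with
    | none => simp at hgl
    | some x =>
      have hx : x ∈ a :: s' := List.mem_of_getLast? hgl
      have hnx : n < x := hmono x hx
      simp [pvLastLt, hgl]
      intro hlt
      exact lt_trans hnx hlt

-- the same k+1-letter words, enumerated by their LAST letter instead of their first
lemma pvC_succ_back (k : Nat) (l : List Char) (hl : l.Pairwise (· < ·)) :
    pvC (k+1) l = (pvC k l).flatMap (fun s => (l.filter (pvLastLt s)).map (fun d => s ++ [d])) := by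
  induction k generalizing l with
  | zero =>
    induction l with
    | nil => simp [pvC]
    | cons a l' ihl => simp_all [pvC, pvLastLt]
  | succ k ih =>
    show l.flatMap (fun n => (pvC (k+1) (l.filter (fun d => decide (n < d)))).map (fun s => n :: s)) = _
    rw [List.flatMap_congr (g := fun n =>
        ((pvC k (l.filter (fun d => decide (n < d)))).flatMap
          (fun s => ((l.filter (fun d => decide (n < d))).filter (pvLastLt s)).map (fun d => s ++ [d]))).map
          (fun s => n :: s)) ?_]
    · conv_rhs => rw [show pvC (k+1) l = l.flatMap (fun n => (pvC k (l.filter (fun d => decide (n < d)))).map (fun s => n :: s)) from rfl]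
      rw [List.flatMap_assoc]
      apply List.flatMap_congr
      intro n hn
      rw [List.map_flatMap, List.flatMap_map]
      apply List.flatMap_congr
      intro s hs
      have hmono : ∀ x ∈ s, n < x := by
        intro x hx
        have hm := mem_pvC hs x hx
        rw [List.mem_filter] at hm
        exact of_decide_eq_true hm.2
      rw [filter_cnd_cons l n s hmono]
      simp
    · intro n hn
      rw [ih (l.filter (fun d => decide (n < d))) (List.Pairwise.filter _ hl)]

lemma pvPool_pairwise (t : List Char) : (pvPool t).Pairwise (· < ·) := by
  exact List.Pairwise.filter _ (by decide)

-- one pass of B's comprehension advances the canonical enumeration by one letter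
lemma pvStep_eq (t : List Char) (j : Nat) :
    pvStep t (pvC j (pvPool t)) = pvC (j+1) (pvPool t) := by
  rw [pvC_succ_back j (pvPool t) (pvPool_pairwise t), pvStep]
  apply List.flatMap_congr
  intro s hs
  congr 1
  cases s with
  | nil => simp [pvPool, pvLastLt]
  | cons a s' =>
    have hne : a :: s' ≠ [] := by simp
    have hfun : ∀ d, pvLastLt (t ++ a :: s') d = pvLastLt (a :: s') d := by
      intro d
      simp [pvLastLt, List.getLast?_append_of_ne_nil t hne]
    show pvDigits.filter (fun d => pvLastLt (t ++ a :: s') d) = (pvPool t).filter (pvLastLt (a :: s'))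
    unfold pvPool
    rw [List.filter_filter]
    apply List.filter_congr
    intro d _
    rw [hfun d]
    cases hc : pvLastLt (a :: s') d with
    | false => simp
    | true =>
      cases hgl : (a :: s').getLast? with
      | none => simp at hgl
      | some x =>
        have hx : x ∈ a :: s' := List.mem_of_getLast? hgl
        have hxp : x ∈ pvPool t := mem_pvC hs x hx
        have hxt : pvLastLt t x = true := (List.mem_filter.1 hxp).2
        have hxd : x < d := by
          simp only [pvLastLt, hgl] at hc
          exact of_decide_eq_true hc
        simp [pvLastLt_trans hxt hxd]

lemma pvC_eq_nil_of_le (t : List Char) (j k : Nat) (h : pvC j (pvPool t) = []) :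
    pvC (j + k) (pvPool t) = [] := by
  induction k with
  | zero => exact h
  | succ k ih =>
    have : pvC (j + k + 1) (pvPool t) = pvStep t (pvC (j + k) (pvPool t)) := (pvStep_eq t (j + k)).symm
    rw [show j + (k + 1) = j + k + 1 from rfl, this, ih, pvStep]
    rfl

-- B's (early-exiting) loop over range(need) computes the canonical enumeration
lemma pvIterB_eq_aux (t : List Char) (m : Nat) :
    ∀ j, pvIterB m t (pvC j (pvPool t)) = pvC (m + j) (pvPool t) := by
  induction m with
  | zero => intro j; simp [pvIterB]
  | succ m ih =>
    intro j
    rw [pvIterB]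
    by_cases hnil : pvC j (pvPool t) = []
    · rw [if_pos hnil, hnil]
      exact (pvC_eq_nil_of_le t j (m + 1) hnil).symm.trans (by ring_nf)
    · rw [if_neg hnil, pvStep_eq, ih (j + 1)]
      congr 1
      omega

lemma pvIter_eq (t : List Char) (m : Nat) :
    pvIterB m t [[]] = pvC m (pvPool t) := by
  simpa using pvIterB_eq_aux t m 0

-- what A's recursion appends after prefix t
def pvRes (t : List Char) (length : Int) : List String :=
  if length - (t.length : Int) < 0 then []
  else (pvC (length - (t.length : Int)).toNat (pvPool t)).map (fun s => String.ofList (t ++ s))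

lemma flatMap_if_eq_filter_flatMap (l : List Char) (p : Char → Bool) (h : Char → List String) :
    l.flatMap (fun n => if p n then h n else []) = (l.filter p).flatMap h := by
  induction l with
  | nil => simp
  | cons a l' ih =>
    by_cases hp : p a = true <;> simp [hp, ih]

lemma pvGoA_eq_res (f : Nat) (t : List Char) (length : Int) (arr : List String)
    (hf : (pvPool t).length < f) : pvGoA f arr t length = arr ++ pvRes t length := by
  induction f generalizing t arr with
  | zero => omega
  | succ f ih =>
    by_cases heq : (t.length : Int) = length
    · simp [pvGoA, heq, pvRes, pvC]
    · have hbody : pvGoA (f+1) arr t length =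
          pvDigits.foldl (fun acc n => if pvCondA t n then pvGoA f acc (t ++ [n]) length else acc) arr := by
        simp [pvGoA, heq]
      rw [hbody]
      rw [PySem.List.foldl_congr_mem pvDigits _
        (fun acc n => acc ++ (if pvLastLt t n then pvRes (t ++ [n]) length else [])) arr ?_]
      · rw [PySem.List.foldl_append_eq_flatMap, flatMap_if_eq_filter_flatMap]
        congr 1
        show (pvPool t).flatMap (fun n => pvRes (t ++ [n]) length) = pvRes t length
        by_cases hneg : length - (t.length : Int) < 0
        · have hall : ∀ n ∈ pvPool t, pvRes (t ++ [n]) length = [] := by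
            intro n _
            simp only [pvRes, List.length_append]
            rw [if_pos (by push_cast; omega)]
          rw [List.flatMap_congr (g := fun _ => []) hall]
          simp [pvRes, hneg]
        · have hpos : 0 < length - (t.length : Int) := by omega
          have hk : (length - (t.length : Int)).toNat = (length - (t.length : Int) - 1).toNat + 1 := by omega
          rw [pvRes, if_neg hneg, hk]
          show _ = ((pvPool t).flatMap (fun n =>
              (pvC (length - (t.length : Int) - 1).toNat ((pvPool t).filter (fun d => decide (n < d)))).map
                (fun s => n :: s))).map (fun s => String.ofList (t ++ s))
          rw [List.map_flatMap]
          apply List.flatMap_congr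
          intro n hn
          have hnlt : pvLastLt t n = true := (List.mem_filter.1 hn).2
          rw [pvRes, List.length_append]
          rw [if_neg (by simp only [List.length_cons, List.length_nil]; push_cast; omega)]
          rw [pvPool_concat, ← pvPool_filter t n hnlt]
          have harg : (length - ((t.length + [n].length : Nat) : Int)).toNat
              = (length - (t.length : Int) - 1).toNat := by
            simp only [List.length_cons, List.length_nil]
            push_cast
            omega
          rw [harg, List.map_map]
          apply List.map_congr_left
          intro s _
          show String.ofList ((t ++ [n]) ++ s) = String.ofList (t ++ n :: s)
          rw [List.append_assoc]
          rfl
      · intro acc n hn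
        show (if pvCondA t n then pvGoA f acc (t ++ [n]) length else acc)
            = acc ++ (if pvLastLt t n then pvRes (t ++ [n]) length else [])
        rw [pvCondA_eq]
        by_cases hc : pvLastLt t n = true
        · rw [if_pos hc, if_pos hc]
          exact ih (t ++ [n]) acc (by have := pvPool_concat_lt t n hc hn; omega)
        · rw [Bool.not_eq_true] at hc
          rw [hc]
          simp

lemma pvPool_len_le (t : List Char) : (pvPool t).length ≤ 10 := by
  calc (pvPool t).length ≤ pvDigits.length := List.length_filter_le _ _
    _ = 10 := rfl

-- ===== VERDICT (by name: the statement is the Claim_ definition above) =====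
theorem MBN_spec : Claim_equal_MBN := by
  intro arr tmp length _
  show MBN arr tmp length = MBN_alt arr tmp length
  rw [MBN, pvGoA_eq_res 11 _ _ _ (lt_of_le_of_lt (pvPool_len_le _) (by norm_num))]
  have halt : MBN_alt arr tmp length =
      (if length - (tmp.toList.length : Int) < 0 then arr
       else arr ++ (pvIterB (length - (tmp.toList.length : Int)).toNat tmp.toList [[]]).map
          (fun s => String.ofList (tmp.toList ++ s))) := rfl
  rw [halt, pvRes]
  by_cases hneg : length - (tmp.toList.length : Int) < 0
  · rw [if_pos hneg, if_pos hneg, List.append_nil]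
  · rw [if_neg hneg, if_neg hneg, pvIter_eq]
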